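-- pv_equiv track=rewrite | github.com/JoannaDorval/CyberShield | excel_generator.py | _analyze_stride_threat
-- ===== SOURCE A (Python) =====
-- from typing import Dict, List, Any, Optional
--
-- def _analyze_stride_threat(threat: Dict) -> Dict[str, str]:
--     """Analyze threat against STRIDE categories"""
--     threat_type = threat.get('type', '').lower()
--     threat_desc = threat.get('description', '').lower()
--
--     stride = {
--         'spoofing': 'Not Applicable',
--         'tampering': 'Not Applicable',
--         'repudiation': 'Not Applicable',
--         'information_disclosure': 'Not Applicable',
--         'denial_of_service': 'Not Applicable',
--         'elevation_of_privileges': 'Not Applicable'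
--     }
--
--     # Simple keyword-based analysis
--     if any(word in threat_desc for word in ['identity', 'authentication', 'imperson']):
--         stride['spoofing'] = 'High Risk'
--
--     if any(word in threat_desc for word in ['modify', 'alter', 'tamper', 'change']):
--         stride['tampering'] = 'High Risk'
--
--     if any(word in threat_desc for word in ['deny', 'log', 'audit', 'trace']):
--         stride['repudiation'] = 'Medium Risk'
--
--     if any(word in threat_desc for word in ['data', 'information', 'leak', 'exposure']):
--         stride['information_disclosure'] = 'High Risk'
--
--     if any(word in threat_desc for word in ['dos', 'denial', 'availability', 'service']):
--         stride['denial_of_service'] = 'High Risk'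
--
--     if any(word in threat_desc for word in ['privilege', 'escalation', 'admin', 'root']):
--         stride['elevation_of_privileges'] = 'High Risk'
--
--     return stride
-- ===== SOURCE B (Python) =====
-- # Single-pass multi-pattern scanner: walk the description once and prefix-match
-- # every STRIDE keyword at each position, collecting the matched categories.
-- _KEYWORDS = [
--     ('identity', 'spoofing'), ('authentication', 'spoofing'), ('imperson', 'spoofing'),
--     ('modify', 'tampering'), ('alter', 'tampering'), ('tamper', 'tampering'), ('change', 'tampering'),
--     ('deny', 'repudiation'), ('log', 'repudiation'), ('audit', 'repudiation'), ('trace', 'repudiation'),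
--     ('data', 'information_disclosure'), ('information', 'information_disclosure'),
--     ('leak', 'information_disclosure'), ('exposure', 'information_disclosure'),
--     ('dos', 'denial_of_service'), ('denial', 'denial_of_service'),
--     ('availability', 'denial_of_service'), ('service', 'denial_of_service'),
--     ('privilege', 'elevation_of_privileges'), ('escalation', 'elevation_of_privileges'),
--     ('admin', 'elevation_of_privileges'), ('root', 'elevation_of_privileges'),
-- ]
--
-- _RISKS = [
--     ('spoofing', 'High Risk'), ('tampering', 'High Risk'), ('repudiation', 'Medium Risk'),
--     ('information_disclosure', 'High Risk'), ('denial_of_service', 'High Risk'),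
--     ('elevation_of_privileges', 'High Risk'),
-- ]
--
--
-- def _analyze_stride_threat(threat):
--     """Analyze threat against STRIDE categories (one scan over the description)."""
--     desc = threat.get('description', '').lower()
--     matched = set()
--     for i in range(len(desc) + 1):
--         tail = desc[i:]
--         for kw, cat in _KEYWORDS:
--             if tail.startswith(kw):
--                 matched.add(cat)
--     return {cat: (risk if cat in matched else 'Not Applicable') for cat, risk in _RISKS}
-- ===== Notes on version B (the rewrite author's own statement) =====
-- stated objective: alternative
-- what changed: Replaces six independent substring-search if-statements mutating a pre-built dict with a single left-to-right scan of the description that prefix-matches all 21 STRIDE keywords at each position, accumulating the matched categories in a set before building the result.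
import Mathlib
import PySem

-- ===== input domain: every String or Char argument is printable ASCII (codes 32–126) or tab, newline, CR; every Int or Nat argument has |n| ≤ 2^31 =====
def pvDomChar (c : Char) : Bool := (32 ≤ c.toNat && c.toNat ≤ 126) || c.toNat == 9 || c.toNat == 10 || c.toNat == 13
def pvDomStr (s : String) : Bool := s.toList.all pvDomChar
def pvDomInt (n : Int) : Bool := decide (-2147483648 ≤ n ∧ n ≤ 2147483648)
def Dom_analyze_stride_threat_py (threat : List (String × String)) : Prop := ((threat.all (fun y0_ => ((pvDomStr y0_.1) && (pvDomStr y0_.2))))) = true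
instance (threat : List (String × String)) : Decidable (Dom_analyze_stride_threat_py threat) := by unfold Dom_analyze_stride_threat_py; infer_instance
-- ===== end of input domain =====

-- B replaces A's six substring-search ifs with one position scan of the description
-- prefix-matching all keywords at each position (objective: alternative); return value only.

-- ===== PORT A =====
def analyze_stride_threat_py (threat : List (String × String)) : List (String × String) :=
  let _threat_type := PySem.Str.lower ((threat.lookup "type").getD "")
  let threat_desc := PySem.Str.lower ((threat.lookup "description").getD "")
  let stride := PySem.Dict.ofList [("spoofing", "Not Applicable"), ("tampering", "Not Applicable"),
    ("repudiation", "Not Applicable"), ("information_disclosure", "Not Applicable"),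
    ("denial_of_service", "Not Applicable"), ("elevation_of_privileges", "Not Applicable")]
  let stride := if ["identity", "authentication", "imperson"].any (fun w => PySem.Str.isIn w threat_desc)
    then stride.insert "spoofing" "High Risk" else stride
  let stride := if ["modify", "alter", "tamper", "change"].any (fun w => PySem.Str.isIn w threat_desc)
    then stride.insert "tampering" "High Risk" else stride
  let stride := if ["deny", "log", "audit", "trace"].any (fun w => PySem.Str.isIn w threat_desc)
    then stride.insert "repudiation" "Medium Risk" else stride
  let stride := if ["data", "information", "leak", "exposure"].any (fun w => PySem.Str.isIn w threat_desc)
    then stride.insert "information_disclosure" "High Risk" else stride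
  let stride := if ["dos", "denial", "availability", "service"].any (fun w => PySem.Str.isIn w threat_desc)
    then stride.insert "denial_of_service" "High Risk" else stride
  let stride := if ["privilege", "escalation", "admin", "root"].any (fun w => PySem.Str.isIn w threat_desc)
    then stride.insert "elevation_of_privileges" "High Risk" else stride
  stride.items

-- ===== PORT B =====
-- keyword → category table (B's _KEYWORDS), keywords as char lists
def kwTable : List (List Char × String) :=
  [("identity".toList, "spoofing"), ("authentication".toList, "spoofing"), ("imperson".toList, "spoofing"),
   ("modify".toList, "tampering"), ("alter".toList, "tampering"), ("tamper".toList, "tampering"), ("change".toList, "tampering"),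
   ("deny".toList, "repudiation"), ("log".toList, "repudiation"), ("audit".toList, "repudiation"), ("trace".toList, "repudiation"),
   ("data".toList, "information_disclosure"), ("information".toList, "information_disclosure"),
   ("leak".toList, "information_disclosure"), ("exposure".toList, "information_disclosure"),
   ("dos".toList, "denial_of_service"), ("denial".toList, "denial_of_service"),
   ("availability".toList, "denial_of_service"), ("service".toList, "denial_of_service"),
   ("privilege".toList, "elevation_of_privileges"), ("escalation".toList, "elevation_of_privileges"),
   ("admin".toList, "elevation_of_privileges"), ("root".toList, "elevation_of_privileges")]

def riskTable : List (String × String) :=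
  [("spoofing", "High Risk"), ("tampering", "High Risk"), ("repudiation", "Medium Risk"),
   ("information_disclosure", "High Risk"), ("denial_of_service", "High Risk"),
   ("elevation_of_privileges", "High Risk")]

-- inner loop at one position: add the category of every keyword that is a prefix of the tail
def stepB (tail : List Char) (acc : PySem.Set String) : PySem.Set String :=
  kwTable.foldl (fun m p => if p.1.isPrefixOf tail then PySem.Set.add m p.2 else m) acc

-- outer loop: visit every suffix of the description (including the empty one)
def scanB : List Char → PySem.Set String → PySem.Set String
  | [], acc => stepB [] acc
  | c :: t, acc => scanB t (stepB (c :: t) acc)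

def analyze_stride_threat_py_alt (threat : List (String × String)) : List (String × String) :=
  let desc := PySem.Str.lower ((threat.lookup "description").getD "")
  let matched := scanB desc.toList PySem.Set.empty
  riskTable.map (fun e => (e.1, if matched.contains e.1 then e.2 else "Not Applicable"))

-- ===== PRECONDITION & SPEC =====
def Spec_analyze_stride_threat_py (threat : List (String × String)) (out : List (String × String)) : Prop := out = analyze_stride_threat_py_alt threat
instance (threat : List (String × String)) (out : List (String × String)) : Decidable (Spec_analyze_stride_threat_py threat out) := by unfold Spec_analyze_stride_threat_py; infer_instance

-- ===== CLAIM =====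
def Claim_equal_analyze_stride_threat_py : Prop := ∀ (threat : List (String × String)), Dom_analyze_stride_threat_py threat → Spec_analyze_stride_threat_py threat (analyze_stride_threat_py threat)

-- ===== LEMMAS AND PROOFS =====

-- membership after the inner foldl over the keyword table
lemma mem_stepB (tail : List Char) (acc : PySem.Set String) (x : String) :
    x ∈ stepB tail acc ↔ x ∈ acc ∨ ∃ p ∈ kwTable, p.1.isPrefixOf tail ∧ p.2 = x := by
  unfold stepB
  generalize kwTable = l
  induction l generalizing acc with
  | nil => simp
  | cons q l ih =>
      simp only [List.foldl_cons, ih, List.mem_cons]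
      split_ifs with h
      · simp only [PySem.Set.mem_add]
        constructor
        · rintro ((ha | hx) | ⟨p, hp, hpre, hpx⟩)
          · exact .inl ha
          · exact .inr ⟨q, .inl rfl, h, hx.symm⟩
          · exact .inr ⟨p, .inr hp, hpre, hpx⟩
        · rintro (ha | ⟨p, (rfl | hp), hpre, hpx⟩)
          · exact .inl (.inl ha)
          · exact .inl (.inr hpx.symm)
          · exact .inr ⟨p, hp, hpre, hpx⟩
      · constructor
        · rintro (ha | ⟨p, hp, hpre, hpx⟩)
          · exact .inl ha
          · exact .inr ⟨p, .inr hp, hpre, hpx⟩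
        · rintro (ha | ⟨p, (rfl | hp), hpre, hpx⟩)
          · exact .inl ha
          · exact absurd hpre h
          · exact .inr ⟨p, hp, hpre, hpx⟩

-- membership after the whole scan: some keyword of x is a prefix of some suffix
lemma mem_scanB (cs : List Char) (acc : PySem.Set String) (x : String) :
    x ∈ scanB cs acc ↔ x ∈ acc ∨ ∃ p ∈ kwTable, (∃ j, p.1 <+: cs.drop j) ∧ p.2 = x := by
  induction cs generalizing acc with
  | nil =>
      simp only [scanB, mem_stepB, List.drop_nil]
      constructor
      · rintro (ha | ⟨p, hp, hpre, hpx⟩)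
        · exact .inl ha
        · exact .inr ⟨p, hp, ⟨0, by simpa using hpre⟩, hpx⟩
      · rintro (ha | ⟨p, hp, ⟨j, hpre⟩, hpx⟩)
        · exact .inl ha
        · exact .inr ⟨p, hp, by simpa using hpre, hpx⟩
  | cons c t ih =>
      simp only [scanB, ih, mem_stepB]
      constructor
      · rintro ((ha | ⟨p, hp, hpre, hpx⟩) | ⟨p, hp, ⟨j, hpre⟩, hpx⟩)
        · exact .inl ha
        · exact .inr ⟨p, hp, ⟨0, by simpa using hpre⟩, hpx⟩
        · exact .inr ⟨p, hp, ⟨j + 1, by simpa using hpre⟩, hpx⟩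
      · rintro (ha | ⟨p, hp, ⟨j, hpre⟩, hpx⟩)
        · exact .inl (.inl ha)
        · cases j with
          | zero => exact .inl (.inr ⟨p, hp, by simpa using hpre, hpx⟩)
          | succ j => exact .inr ⟨p, hp, ⟨j, by simpa using hpre⟩, hpx⟩

-- the scan's verdict for one category equals A's any-isIn test over that category's keywords
lemma contains_scanB (d : String) (cat : String) (ws : List String)
    (h1 : ∀ p ∈ kwTable, p.2 = cat → ∃ w ∈ ws, p.1 = w.toList)
    (h2 : ∀ w ∈ ws, (w.toList, cat) ∈ kwTable) :
    (scanB d.toList PySem.Set.empty).contains cat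
      = ws.any (fun w => PySem.Str.isIn w d) := by
  rw [Bool.eq_iff_iff, PySem.Set.contains_iff, mem_scanB, List.any_eq_true]
  constructor
  · rintro (h | ⟨p, hp, ⟨j, hpre⟩, hpx⟩)
    · simp [PySem.Set.empty] at h
    · obtain ⟨w, hw, hwl⟩ := h1 p hp hpx
      refine ⟨w, hw, ?_⟩
      rw [PySem.Str.isIn_iff_infix, ← PySem.Chars.isIn_iff_infix]
      exact (PySem.Chars.exists_prefix_drop_iff_isIn _ _).mp ⟨j, hwl ▸ hpre⟩
  · rintro ⟨w, hw, hin⟩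
    rw [PySem.Str.isIn_iff_infix, ← PySem.Chars.isIn_iff_infix] at hin
    obtain ⟨j, hpre⟩ := (PySem.Chars.exists_prefix_drop_iff_isIn _ _).mpr hin
    exact .inr ⟨(w.toList, cat), h2 w hw, ⟨j, hpre⟩, rfl⟩

-- ===== VERDICT =====
theorem analyze_stride_threat_py_spec : Claim_equal_analyze_stride_threat_py := by
  intro threat _
  unfold Spec_analyze_stride_threat_py analyze_stride_threat_py analyze_stride_threat_py_alt riskTable
  set d := PySem.Str.lower ((threat.lookup "description").getD "") with hd
  simp only [List.map]
  rw [contains_scanB d "spoofing" ["identity", "authentication", "imperson"] (by decide) (by decide),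
      contains_scanB d "tampering" ["modify", "alter", "tamper", "change"] (by decide) (by decide),
      contains_scanB d "repudiation" ["deny", "log", "audit", "trace"] (by decide) (by decide),
      contains_scanB d "information_disclosure" ["data", "information", "leak", "exposure"] (by decide) (by decide),
      contains_scanB d "denial_of_service" ["dos", "denial", "availability", "service"] (by decide) (by decide),
      contains_scanB d "elevation_of_privileges" ["privilege", "escalation", "admin", "root"] (by decide) (by decide)]
  split_ifs <;> rfl
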